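-- pv_equiv track=rewrite | github.com/RobyJacob/Coding-problems | foobar_1.py | solution
-- ===== SOURCE A (Python) =====
-- def inifinite_sequence():
--     num = 2
--     while True:
--         yield num
--         num += 1
--
-- def is_prime(num):
--     import math
--     count = 0
--     for n in range(1, int(math.sqrt(num))+1):
--         if num % n == 0:
--             count += 1
--     if count < 2:
--         return True
--     return False
--
-- def solution(i):
--     index = 0
--     id = ""
--     for num in inifinite_sequence():
--         if is_prime(num):
--             id += str(num)
--             index += 1
--             if index > i+5:
--                 break
--     return id[i:i+5]
-- ===== SOURCE B (Python) =====
-- def _sieve(limit):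
--     comp = [False] * (limit + 1)
--     for p in range(2, limit + 1):
--         for m in range(2 * p, limit + 1, p):
--             comp[m] = True
--     return [n for n in range(2, limit + 1) if not comp[n]]
--
--
-- def solution(i):
--     need = i + 6
--     if need < 1:
--         need = 1
--     limit = 16
--     while True:
--         primes = _sieve(limit)
--         if len(primes) >= need:
--             break
--         limit *= 2
--     digits = "".join(str(p) for p in primes[:need])
--     return digits[i:i + 5]
-- ===== Notes on version B (the rewrite author's own statement) =====
-- stated objective: faster
-- what changed: Replaces per-candidate trial division (counting divisors up to sqrt for every integer) by a sieve of Eratosthenes over a doubling limit, then slices the concatenation of the first max(1,i+6) primes.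
import Mathlib
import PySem

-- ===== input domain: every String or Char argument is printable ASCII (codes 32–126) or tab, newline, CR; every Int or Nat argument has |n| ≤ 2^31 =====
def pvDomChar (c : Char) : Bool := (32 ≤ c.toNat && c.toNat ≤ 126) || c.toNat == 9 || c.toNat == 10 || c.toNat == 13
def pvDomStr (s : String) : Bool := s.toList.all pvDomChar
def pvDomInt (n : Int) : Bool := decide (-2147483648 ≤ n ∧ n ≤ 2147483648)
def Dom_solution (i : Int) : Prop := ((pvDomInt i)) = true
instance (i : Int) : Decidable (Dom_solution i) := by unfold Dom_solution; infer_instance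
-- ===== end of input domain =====

-- B replaces A's per-candidate trial division by a sieve of Eratosthenes over a doubling limit (objective: faster).


-- ===== PORT A =====
-- is_prime: counts divisors n in range(1, int(math.sqrt(num))+1); int(math.sqrt(num)) is ported
-- as Nat.sqrt (exact on the range of values this program reaches).
def isPrimeA (num : Int) : Bool :=
  let count : Int := (PySem.List.pyRange 1 ((num.toNat.sqrt : Int) + 1) 1).foldl
      (fun c n => if PySem.Int.mod num n == 0 then c + 1 else c) 0
  decide (count < 2)

lemma isPrimeA_natCast (n : Nat) :
    isPrimeA (n : Int) = (decide n.Prime || decide (n ≤ 1)) := by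
  simp only [isPrimeA, Int.toNat_natCast,
    PySem.List.foldl_count_if (fun m => PySem.Int.mod (n : Int) m == 0)]
  rcases Nat.lt_or_ge n 2 with h2 | h2
  · interval_cases n <;> decide
  · have hs1 : 1 ≤ n.sqrt := Nat.sqrt_pos.mpr (by omega)
    rw [PySem.List.pyRange_one_cons (by omega : (1:Int) < (n.sqrt : Int) + 1)]
    rw [List.countP_cons]
    have hp1 : PySem.Int.mod (n : Int) 1 = 0 :=
      (PySem.Int.mod_eq_zero_iff_dvd _ _).mpr (one_dvd _)
    have hn1 : decide (n ≤ 1) = false := by simp; omega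
    rw [hn1, Bool.or_false]
    simp only [hp1, show ((1:Int) + 1) = 2 by ring]
    norm_num
    rw [Nat.prime_def_le_sqrt]
    constructor
    · intro hno
      refine ⟨h2, fun m hm2 hms hdvd => ?_⟩
      refine hno (m : Int) (by exact_mod_cast hm2) (by exact_mod_cast hms) ?_
      exact (PySem.Int.mod_eq_zero_iff_dvd _ _).mpr (Int.natCast_dvd_natCast.mpr hdvd)
    · rintro ⟨-, hnd⟩ m hm2 hms hmod
      have hdvd : m ∣ (n : Int) := (PySem.Int.mod_eq_zero_iff_dvd _ _).mp hmod
      have hcast : m = ((m.toNat : Nat) : Int) := by omega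
      rw [hcast] at hdvd
      exact hnd m.toNat (by omega) (by omega) (Int.natCast_dvd_natCast.mp hdvd)

def nextP (n : Nat) : Nat := Nat.find (Nat.exists_infinite_primes n)

lemma nextP_gap_lt (n : Nat) (h : isPrimeA (n : Int) = false) :
    nextP (n + 1) - (n + 1) < nextP n - n := by
  rw [isPrimeA_natCast] at h
  simp only [Bool.or_eq_false_iff, decide_eq_false_iff_not] at h
  obtain ⟨hnp, hn1⟩ := h
  have hspec := Nat.find_spec (Nat.exists_infinite_primes n)
  have hle : n ≤ nextP n := hspec.1
  have hprime : (nextP n).Prime := hspec.2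
  have hne : nextP n ≠ n := fun he => hnp (he ▸ hprime)
  have hle2 : nextP (n + 1) ≤ nextP n :=
    Nat.find_le ⟨by omega, hprime⟩
  omega


-- the 'for num in inifinite_sequence(): …' loop of solution, with its break condition;
-- nextP_gap_lt/isPrimeA_natCast above are cited by its termination proof
def loopA (i index : Int) (num : Nat) (acc : String) : String :=
  if isPrimeA (num : Int) then
    let acc' := acc ++ PySem.Int.toStr (num : Int)
    if index + 1 > i + 5 then acc'
    else loopA i (index + 1) (num + 1) acc'
  else loopA i index (num + 1) acc
termination_by ((i + 5 - index).toNat, nextP num - num)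
decreasing_by
  all_goals first
    | (apply Prod.Lex.left; omega)
    | (apply Prod.Lex.right; apply nextP_gap_lt; simp_all)

def solution (i : Int) : String :=
  PySem.Str.slice (loopA i 0 2 "") (some i) (some (i + 5))

-- ===== PORT B =====
def sieveB (limit : Int) : List Int :=
  let comp : List Bool := PySem.List.pyRepeat [false] (limit + 1)
  let comp := (PySem.List.pyRange 2 (limit + 1) 1).foldl (fun comp p =>
    (PySem.List.pyRange (2 * p) (limit + 1) p).foldl
      (fun a m => PySem.List.pySetD a m true) comp) comp
  (PySem.List.pyRange 2 (limit + 1) 1).filter (fun n => !(PySem.List.pyGetD comp n false))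

lemma foldl_set_getElem? (ms : List Int) (hms : ∀ m ∈ ms, 0 ≤ m) (comp : List Bool) (x : Nat) :
    (ms.foldl (fun a m => PySem.List.pySetD a m true) comp)[x]?
      = comp[x]?.map (fun b => b || decide ((x : Int) ∈ ms)) := by
  induction ms generalizing comp with
  | nil => simp
  | cons m ms ih =>
    have hm0 : 0 ≤ m := hms m (by simp)
    rw [List.foldl_cons, ih (fun m hm => hms m (by simp [hm]))]
    rw [PySem.List.pySetD_of_nonneg _ _ hm0]
    have hxm : ((x : Int) = m) ↔ x = m.toNat := by omega
    by_cases hx : x = m.toNat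
    · subst hx
      by_cases hlt : m.toNat < comp.length
      · rw [List.getElem?_set_self hlt]
        rw [List.getElem?_eq_getElem hlt]
        have hmm : ((m.toNat : Nat) : Int) = m := by omega
        simp [hmm]
      · rw [List.set_eq_of_length_le (by omega)]
        have : comp[m.toNat]? = none := by rw [List.getElem?_eq_none_iff]; omega
        simp [this]
    · rw [List.getElem?_set_ne (by omega)]
      cases hcb : comp[x]? with
      | none => simp
      | some b =>
        simp only [List.mem_cons, Option.map_some, hxm]
        simp [hx]

lemma foldl_mark_getElem? (L : Int) (ps : List Int) (hps : ∀ p ∈ ps, 0 < p)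
    (comp : List Bool) (x : Nat) :
    (ps.foldl (fun comp p =>
        (PySem.List.pyRange (2 * p) (L + 1) p).foldl
          (fun a m => PySem.List.pySetD a m true) comp) comp)[x]?
      = comp[x]?.map (fun b =>
          b || ps.any (fun p => decide ((x : Int) ∈ PySem.List.pyRange (2 * p) (L + 1) p))) := by
  induction ps generalizing comp with
  | nil => simp
  | cons p ps ih =>
    have hp0 : 0 < p := hps p (by simp)
    rw [List.foldl_cons, ih (fun q hq => hps q (by simp [hq]))]
    rw [foldl_set_getElem? _ (fun m hm => ?_) comp x]
    · rw [Option.map_map]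
      cases comp[x]? with
      | none => simp
      | some b => simp [Bool.or_assoc]
    · rw [PySem.List.mem_pyRange_iff_of_pos hp0] at hm
      omega

lemma any_mark_iff (L n : Nat) (h2 : 2 ≤ n) (hn : n ≤ L) :
    ((PySem.List.pyRange 2 ((L : Int) + 1) 1).any
        (fun p => decide ((n : Int) ∈ PySem.List.pyRange (2 * p) ((L : Int) + 1) p)))
      = !decide n.Prime := by
  by_cases hp : n.Prime
  · simp only [hp, decide_true, Bool.not_true]
    rw [List.any_eq_false]
    intro p hpmem
    rw [PySem.List.mem_pyRange_one] at hpmem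
    simp only [decide_eq_true_eq]
    intro hmem
    rw [PySem.List.mem_pyRange_iff_of_pos (by omega)] at hmem
    obtain ⟨hlo, hhi, hdvd⟩ := hmem
    have hdn : p ∣ (n : Int) := by
      have h2p : p ∣ 2 * p := Dvd.intro 2 (by ring)
      have := dvd_add hdvd h2p
      simpa using this
    have hpn : p.toNat ∣ n := by
      have : ((p.toNat : Nat) : Int) ∣ (n : Int) := by
        have : ((p.toNat : Nat) : Int) = p := by omega
        rw [this]; exact hdn
      exact_mod_cast this
    rcases (hp.eq_one_or_self_of_dvd p.toNat hpn) with h1 | h1 <;> omega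
  · simp only [hp, decide_false, Bool.not_false]
    rw [List.any_eq_true]
    have hn1 : n ≠ 1 := by omega
    have hpf : n.minFac.Prime := Nat.minFac_prime hn1
    have hdvd : n.minFac ∣ n := Nat.minFac_dvd n
    obtain ⟨k, hk⟩ := hdvd
    have hp2 : 2 ≤ n.minFac := hpf.two_le
    have hk2 : 2 ≤ k := by
      rcases Nat.lt_or_ge k 2 with hlt | hge
      · interval_cases k
        · omega
        · exfalso; exact hp (by rw [hk, Nat.mul_one]; exact hpf)
      · exact hge
    refine ⟨(n.minFac : Int), ?_, ?_⟩
    · rw [PySem.List.mem_pyRange_one]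
      constructor
      · exact_mod_cast hp2
      · have : n.minFac ≤ n := by nlinarith
        omega
    · simp only [decide_eq_true_eq]
      rw [PySem.List.mem_pyRange_iff_of_pos (by omega : (0:Int) < (n.minFac : Int))]
      refine ⟨by push_cast; nlinarith, by omega, ?_⟩
      have hdvd2 : (n.minFac : Int) ∣ (n : Int) :=
        Int.natCast_dvd_natCast.mpr (Dvd.intro k hk.symm)
      exact dvd_sub hdvd2 (Dvd.intro 2 (by ring))

lemma sieveB_eq_filter (L : Nat) :
    sieveB (L : Int)
      = ((List.range (L + 1)).filter (fun n => decide n.Prime)).map (fun n : Nat => (n : Int)) := by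
  rcases Nat.eq_zero_or_pos L with h0 | hL
  · subst h0
    rw [show ((0:Nat) : Int) = 0 by rfl]
    simp only [sieveB]
    rw [PySem.List.pyRange_one_eq_nil (by omega)]
    simp
    decide
  have hps : ∀ p ∈ PySem.List.pyRange 2 ((L : Int) + 1) 1, 0 < p := by
    intro p hp; rw [PySem.List.mem_pyRange_one] at hp; omega
  simp only [sieveB]
  set c := List.foldl (fun comp p => List.foldl (fun a m => PySem.List.pySetD a m true) comp
      (PySem.List.pyRange (2 * p) ((L : Int) + 1) p))
      (PySem.List.pyRepeat [false] ((L : Int) + 1)) (PySem.List.pyRange 2 ((L : Int) + 1) 1)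
    with hc
  have hpt : ∀ n : Nat, 2 ≤ n → n ≤ L →
      (!(PySem.List.pyGetD c (n : Int) false)) = decide n.Prime := by
    intro n h2 hnL
    rw [PySem.List.pyGetD_of_nonneg _ _ (by omega)]
    rw [List.getD_eq_getElem?_getD, Int.toNat_natCast, hc]
    rw [foldl_mark_getElem? _ _ hps]
    rw [PySem.List.pyRepeat_singleton]
    rw [List.getElem?_replicate]
    rw [if_pos (by omega : n < ((L : Int) + 1).toNat)]
    rw [Option.map_some]
    rw [Bool.false_or]
    rw [any_mark_iff L n h2 hnL]
    simp
  have hM : (((L : Int) + 1) - 2).toNat = L - 1 := by omega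
  rw [PySem.List.pyRange_one 2 ((L : Int) + 1), hM, List.filter_map]
  have hsplit : List.range (L + 1) = List.range 2 ++ (List.range (L - 1)).map (2 + ·) := by
    rw [← List.range_add]; congr 1; omega
  have hR : (List.range (L + 1)).filter (fun n => decide n.Prime)
      = ((List.range (L - 1)).map (2 + ·)).filter (fun n => decide n.Prime) := by
    rw [hsplit, List.filter_append,
      show (List.range 2).filter (fun n => decide n.Prime) = [] from by decide,
      List.nil_append]
  rw [hR, List.filter_map, List.map_map]
  rw [List.filter_congr (q := (fun n => decide n.Prime) ∘ (2 + ·)) ?_]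
  · apply List.map_congr_left
    intro k hk
    simp only [Function.comp_apply]
    push_cast
    ring
  · intro k hk
    rw [List.mem_range] at hk
    simp only [Function.comp_apply]
    rw [show (2 : Int) + (k : Int) = ((2 + k : Nat) : Int) by push_cast; ring]
    exact hpt (2 + k) (by omega) (by omega)

lemma length_sieveB (L : Nat) :
    (sieveB (L : Int)).length = Nat.count Nat.Prime (L + 1) := by
  rw [sieveB_eq_filter, List.length_map, ← List.countP_eq_length_filter]
  rfl

def growB (need limit : Nat) (hl : 0 < limit) : List Int :=
  let primes := sieveB (limit : Int)
  if primes.length < need then growB need (2 * limit) (by omega) else primes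
termination_by Nat.nth Nat.Prime (need - 1) + 1 - limit
decreasing_by
  rename_i hlt
  have hlen : (sieveB (limit : Int)).length = Nat.count Nat.Prime (limit + 1) :=
    length_sieveB limit
  simp only [primes] at hlt
  have hn : ¬ (need - 1 < Nat.count Nat.Prime (limit + 1)) := by omega
  have h2 := (Nat.lt_nth_iff_count_lt Nat.infinite_setOf_prime
    (a := need - 1) (b := limit + 1)).not.mp hn
  have he : Nat.nth (fun p => Nat.Prime p) (need - 1) = Nat.nth Nat.Prime (need - 1) := rfl
  omega


def solution_alt (i : Int) : String :=
  let need0 : Int := i + 6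
  let need : Int := if need0 < 1 then 1 else need0
  let primes := growB need.toNat 16 (by omega)
  let digits := PySem.Str.join ""
    ((PySem.List.slice primes none (some need)).map (fun p => PySem.Int.toStr p))
  PySem.Str.slice digits (some i) (some (i + 5))

-- ===== PRECONDITION & SPEC =====
def Spec_solution (i : Int) (out : String) : Prop := out = solution_alt i
instance (i : Int) (out : String) : Decidable (Spec_solution i out) := by unfold Spec_solution; infer_instance

-- ===== CLAIM (what is proved, stated in full; the proofs are below) =====
def Claim_equal_solution : Prop := ∀ (i : Int), Dom_solution i → Spec_solution i (solution i)

-- ===== LEMMAS AND PROOFS =====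

lemma join_nil_flatten (l : List (List Char)) : PySem.Chars.join [] l = l.flatten := by
  simp only [PySem.Chars.join, List.intercalate]
  induction l with
  | nil => simp
  | cons a t ih =>
    cases t with
    | nil => simp
    | cons b t2 =>
      rw [List.intersperse_cons₂, List.flatten_cons, List.flatten_cons, ih]
      simp

lemma loopA_toList (i index : Int) (num : Nat) (acc : String) (h2 : 2 ≤ num) :
    (loopA i index num acc).toList
      = acc.toList
        ++ ((List.range ((i + 5 - index).toNat + 1)).map
            (fun j => PySem.Int.toChars ((Nat.nth Nat.Prime (Nat.count Nat.Prime num + j) : Nat) : Int))).flatten := by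
  revert h2
  fun_induction loopA i index num acc with
  | case1 index num acc hpr acc' hbrk =>
    intro h2
    have hprime : num.Prime := by
      rw [isPrimeA_natCast] at hpr
      rcases Bool.or_eq_true_iff.mp hpr with h | h
      · exact of_decide_eq_true h
      · exfalso; have := of_decide_eq_true h; omega
    have hz : (i + 5 - index).toNat = 0 := by omega
    rw [hz, String.toList_append, PySem.Int.toList_toStr]
    simp [Nat.nth_count hprime]
  | case2 index num acc hpr acc' hbrk ih =>
    intro h2
    have hprime : num.Prime := by
      rw [isPrimeA_natCast] at hpr
      rcases Bool.or_eq_true_iff.mp hpr with h | h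
      · exact of_decide_eq_true h
      · exfalso; have := of_decide_eq_true h; omega
    rw [ih (by omega), String.toList_append, PySem.Int.toList_toStr, List.append_assoc]
    congr 1
    have hcnt : Nat.count Nat.Prime (num + 1) = Nat.count Nat.Prime num + 1 := by
      rw [Nat.count_succ]; simp [hprime]
    have hr : (i + 5 - index).toNat + 1 = ((i + 5 - (index + 1)).toNat + 1) + 1 := by omega
    conv_rhs => rw [hr, List.range_succ_eq_map, List.map_cons, List.flatten_cons, List.map_map]
    congr 1
    · simp [Nat.nth_count hprime]
    · apply congrArg
      apply List.map_congr_left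
      intro j hj
      simp only [Function.comp_apply, Nat.succ_eq_add_one]
      rw [hcnt]
      have harith : Nat.count Nat.Prime num + 1 + j = Nat.count Nat.Prime num + (j + 1) := by omega
      rw [harith]
  | case3 index num acc hpr ih =>
    intro h2
    have hnp : ¬ num.Prime := by
      rw [isPrimeA_natCast] at hpr
      simp only [Bool.or_eq_true, decide_eq_true_eq, not_or] at hpr
      exact hpr.1
    rw [ih (by omega)]
    congr 3
    rw [Nat.count_succ]
    simp [hnp]

lemma filter_range_prime (m : Nat) :
    (List.range m).filter (fun n => decide n.Prime)
      = (List.range (Nat.count Nat.Prime m)).map (Nat.nth Nat.Prime) := by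
  induction m with
  | zero => simp
  | succ m ih =>
    rw [List.range_succ, List.filter_append, ih, Nat.count_succ]
    by_cases hp : m.Prime
    · simp only [hp, if_pos, List.filter_cons, decide_eq_true_eq]
      rw [List.range_succ, List.map_append]
      simp [hp, Nat.nth_count hp]
    · simp [hp]

lemma growB_take (need limit : Nat) (hl : 0 < limit) :
    (growB need limit hl).take need
      = (List.range need).map (fun j => ((Nat.nth Nat.Prime j : Nat) : Int)) := by
  fun_induction growB need limit hl with
  | case1 limit hl primes hlt ih => exact ih
  | case2 limit hl primes hlt =>
    have hlen : (sieveB (limit : Int)).length = Nat.count Nat.Prime (limit + 1) :=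
      length_sieveB limit
    have hcnt : need ≤ Nat.count Nat.Prime (limit + 1) := by
      simp only [primes, length_sieveB] at hlt; omega
    simp only [primes, sieveB_eq_filter, filter_range_prime]
    rw [← List.map_take, ← List.map_take, List.take_range]
    rw [Nat.min_eq_left hcnt, List.map_map]
    rfl

-- ===== VERDICT (by name: the statement is the Claim_ definition above) =====
theorem solution_spec : Claim_equal_solution := by
  unfold Claim_equal_solution Spec_solution
  intro i _
  simp only [solution, solution_alt]
  apply String.toList_inj.mp
  rw [PySem.Str.toList_slice, PySem.Str.toList_slice]
  congr 1
  rw [loopA_toList i 0 2 "" (by omega)]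
  rw [PySem.Str.toList_join, show ("" : String).toList = [] from rfl, join_nil_flatten,
    List.nil_append]
  rw [List.map_map]
  have hneed0 : (0 : Int) ≤ (if i + 6 < 1 then 1 else i + 6) := by split <;> omega
  rw [PySem.List.slice_to _ hneed0]
  rw [growB_take]
  rw [List.map_map]
  have hc2 : Nat.count Nat.Prime 2 = 0 := by
    simp [Nat.count_succ, Nat.count_zero, Nat.not_prime_zero, Nat.not_prime_one]
  have hrr : (i + 5 - 0).toNat + 1 = (if i + 6 < 1 then 1 else i + 6).toNat := by
    by_cases h6 : i + 6 < 1 <;> simp [h6] <;> omega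
  rw [hrr, hc2]
  apply congrArg
  apply List.map_congr_left
  intro j hj
  simp
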